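-- pv_equiv track=rewrite | github.com/TheDanielMalka/MEGO | Objects/TaskManager/data_models.py | category_analyze
-- ===== SOURCE A (Python) =====
-- def category_analyze(input_list:list) -> str:
--     categories = {
--         "Work": ["office", "boss", "mail", "meeting", "project", "report", "salary", "client", "work", "job"],
--         "Study": ["python", "exam", "math", "learn", "book", "university", "course", "homework", "test", "science"],
--         "Home": ["clean", "cook", "buy", "laundry", "dishes", "fix", "rent", "garden", "home", "family"],
--         "Health": ["gym", "doctor", "workout", "sport", "medicine", "dentist", "run", "water", "sleep", "healthy"],
--         "Fun": ["movie", "game", "party", "trip", "beer", "friends", "vacation", "music", "hobby", "rest"]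
--     }
--     for key, sections in categories.items():
--         for section in sections:
--             if section in input_list:
--                 input_list.remove(section)
--                 return key
--     return "General"
-- ===== SOURCE B (Python) =====
-- def category_analyze(input_list: list) -> str:
--     categories = {
--         "Work": ["office", "boss", "mail", "meeting", "project", "report", "salary", "client", "work", "job"],
--         "Study": ["python", "exam", "math", "learn", "book", "university", "course", "homework", "test", "science"],
--         "Home": ["clean", "cook", "buy", "laundry", "dishes", "fix", "rent", "garden", "home", "family"],
--         "Health": ["gym", "doctor", "workout", "sport", "medicine", "dentist", "run", "water", "sleep", "healthy"],
--         "Fun": ["movie", "game", "party", "trip", "beer", "friends", "vacation", "music", "hobby", "rest"]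
--     }
--     # Build a flat rank table once: keyword -> (priority rank, category).
--     table = {}
--     rank = 0
--     for key, sections in categories.items():
--         for section in sections:
--             table[section] = (rank, key)
--             rank += 1
--     # One pass over the input, keeping the keyword with the smallest rank seen.
--     best = None  # (rank, keyword, category)
--     for item in input_list:
--         try:
--             info = table.get(item)
--         except TypeError:  # unhashable element can never be a keyword
--             continue
--         if info is not None and (best is None or info[0] < best[0]):
--             best = (info[0], item, info[1])
--     if best is None:
--         return "General"
--     input_list.remove(best[1])
--     return best[2]
-- ===== Notes on version B (the rewrite author's own statement) =====
-- stated objective: faster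
-- what changed: A scans the 50 keywords in priority order testing each for membership in the input list; B builds a keyword->(rank,category) hash table once and makes a single pass over the input keeping the smallest-rank keyword seen.
import Mathlib
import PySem

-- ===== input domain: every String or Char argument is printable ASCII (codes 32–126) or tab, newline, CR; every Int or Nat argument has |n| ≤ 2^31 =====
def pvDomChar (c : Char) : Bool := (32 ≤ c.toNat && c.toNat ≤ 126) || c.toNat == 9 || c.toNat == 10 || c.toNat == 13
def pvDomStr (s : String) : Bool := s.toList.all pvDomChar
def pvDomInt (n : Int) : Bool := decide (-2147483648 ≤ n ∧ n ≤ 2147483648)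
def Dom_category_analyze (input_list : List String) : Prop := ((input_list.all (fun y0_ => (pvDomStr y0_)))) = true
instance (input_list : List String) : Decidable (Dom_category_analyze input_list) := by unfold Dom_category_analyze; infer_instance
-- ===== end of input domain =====

-- B replaces A's per-keyword membership scans by a rank table built once plus one pass over the
-- input keeping the smallest-rank keyword (objective: alternative decomposition, same results).
-- Both Pythons mutate input_list identically (remove the winning keyword's first occurrence);
-- the equivalence proved here concerns the RETURN value.

-- ===== PORT A =====
-- the dict literal of A, as its insertion-ordered items list
def pvCatsA : List (String × List String) :=
  [("Work", ["office", "boss", "mail", "meeting", "project", "report", "salary", "client", "work", "job"]),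
   ("Study", ["python", "exam", "math", "learn", "book", "university", "course", "homework", "test", "science"]),
   ("Home", ["clean", "cook", "buy", "laundry", "dishes", "fix", "rent", "garden", "home", "family"]),
   ("Health", ["gym", "doctor", "workout", "sport", "medicine", "dentist", "run", "water", "sleep", "healthy"]),
   ("Fun", ["movie", "game", "party", "trip", "beer", "friends", "vacation", "music", "hobby", "rest"])]

-- inner loop: 'for section in sections: if section in input_list: …return key' — returns the
-- found section (A removes it and returns key; the remove happens right before the return, so
-- it cannot affect the returned value)
def pvAInner (sections : List String) (input_list : List String) : Option String :=
  match sections with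
  | [] => none
  | s :: rest => if input_list.contains s then some s else pvAInner rest input_list

-- outer loop: 'for key, sections in categories.items(): …'
def pvAOuter (cats : List (String × List String)) (input_list : List String) : String :=
  match cats with
  | [] => "General"
  | (key, sections) :: rest =>
    match pvAInner sections input_list with
    | some _ => key
    | none => pvAOuter rest input_list

def category_analyze (input_list : List String) : String :=
  pvAOuter pvCatsA input_list

-- ===== PORT B =====
def pvCatsB : List (String × List String) :=
  [("Work", ["office", "boss", "mail", "meeting", "project", "report", "salary", "client", "work", "job"]),
   ("Study", ["python", "exam", "math", "learn", "book", "university", "course", "homework", "test", "science"]),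
   ("Home", ["clean", "cook", "buy", "laundry", "dishes", "fix", "rent", "garden", "home", "family"]),
   ("Health", ["gym", "doctor", "workout", "sport", "medicine", "dentist", "run", "water", "sleep", "healthy"]),
   ("Fun", ["movie", "game", "party", "trip", "beer", "friends", "vacation", "music", "hobby", "rest"])]

-- 'table = {}; rank = 0; for key, sections in categories.items(): for section in sections:
--    table[section] = (rank, key); rank += 1'
def pvBTable : PySem.Dict String (Int × String) :=
  (pvCatsB.foldl
    (fun acc kv =>
      kv.2.foldl (fun acc s => (acc.1.insert s (acc.2, kv.1), acc.2 + 1)) acc)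
    (PySem.Dict.empty, 0)).1

-- one step of 'for item in input_list: …' keeping best = (rank, keyword, category)
def pvBStep (best : Option (Int × String × String)) (item : String) :
    Option (Int × String × String) :=
  match pvBTable.get? item with
  | none => best
  | some info =>
    match best with
    | none => some (info.1, item, info.2)
    | some b => if info.1 < b.1 then some (info.1, item, info.2) else best

def category_analyze_alt (input_list : List String) : String :=
  match input_list.foldl pvBStep none with
  | none => "General"
  | some b => b.2.2

-- ===== PRECONDITION & SPEC =====
def Spec_category_analyze (input_list : List String) (out : String) : Prop := out = category_analyze_alt input_list
instance (input_list : List String) (out : String) : Decidable (Spec_category_analyze input_list out) := by unfold Spec_category_analyze; infer_instance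

-- ===== CLAIM (what is proved, stated in full; the proofs are below) =====
def Claim_equal_category_analyze : Prop := ∀ (input_list : List String), Dom_category_analyze input_list → Spec_category_analyze input_list (category_analyze input_list)

-- ===== LEMMAS AND PROOFS =====

-- the flat rank table as a plain list (= pvBTable.items, checked by `decide` below)
def pvT : List (String × Int × String) :=
  [("office", 0, "Work"), ("boss", 1, "Work"), ("mail", 2, "Work"), ("meeting", 3, "Work"),
   ("project", 4, "Work"), ("report", 5, "Work"), ("salary", 6, "Work"), ("client", 7, "Work"),
   ("work", 8, "Work"), ("job", 9, "Work"),
   ("python", 10, "Study"), ("exam", 11, "Study"), ("math", 12, "Study"), ("learn", 13, "Study"),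
   ("book", 14, "Study"), ("university", 15, "Study"), ("course", 16, "Study"),
   ("homework", 17, "Study"), ("test", 18, "Study"), ("science", 19, "Study"),
   ("clean", 20, "Home"), ("cook", 21, "Home"), ("buy", 22, "Home"), ("laundry", 23, "Home"),
   ("dishes", 24, "Home"), ("fix", 25, "Home"), ("rent", 26, "Home"), ("garden", 27, "Home"),
   ("home", 28, "Home"), ("family", 29, "Home"),
   ("gym", 30, "Health"), ("doctor", 31, "Health"), ("workout", 32, "Health"),
   ("sport", 33, "Health"), ("medicine", 34, "Health"), ("dentist", 35, "Health"),
   ("run", 36, "Health"), ("water", 37, "Health"), ("sleep", 38, "Health"),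
   ("healthy", 39, "Health"),
   ("movie", 40, "Fun"), ("game", 41, "Fun"), ("party", 42, "Fun"), ("trip", 43, "Fun"),
   ("beer", 44, "Fun"), ("friends", 45, "Fun"), ("vacation", 46, "Fun"), ("music", 47, "Fun"),
   ("hobby", 48, "Fun"), ("rest", 49, "Fun")]

def pvFlatKV (cats : List (String × List String)) : List (String × String) :=
  match cats with
  | [] => []
  | (key, sections) :: rest => sections.map (fun s => (s, key)) ++ pvFlatKV rest

lemma pvAInner_eq_find? (sections input_list : List String) :
    pvAInner sections input_list = sections.find? (fun s => input_list.contains s) := by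
  induction sections with
  | nil => rfl
  | cons s rest ih =>
    simp only [pvAInner, List.find?_cons]
    by_cases h : s ∈ input_list <;> simp [h, ih]

lemma pvAOuter_eq_find? (cats : List (String × List String)) (input_list : List String) :
    pvAOuter cats input_list =
      (match (pvFlatKV cats).find? (fun e => input_list.contains e.1) with
       | some e => e.2
       | none => "General") := by
  induction cats with
  | nil => rfl
  | cons kv rest ih =>
    obtain ⟨key, sections⟩ := kv
    have hc : ((fun (e : String × String) => input_list.contains e.1) ∘ (fun s => (s, key))) =
        (fun s => input_list.contains s) := rfl
    simp only [pvAOuter, pvFlatKV, List.find?_append, List.find?_map, pvAInner_eq_find?, hc]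
    cases h : sections.find? (fun s => input_list.contains s) with
    | none => simpa [h] using ih
    | some s => simp

lemma pvA_char (input_list : List String) :
    category_analyze input_list =
      (match pvT.find? (fun e => input_list.contains e.1) with
       | some e => e.2.2
       | none => "General") := by
  have hflat : pvFlatKV pvCatsA = pvT.map (fun e => (e.1, e.2.2)) := by rfl
  have hc : ((fun (e : String × String) => input_list.contains e.1) ∘
      (fun (e : String × Int × String) => (e.1, e.2.2))) =
      (fun (e : String × Int × String) => input_list.contains e.1) := rfl
  rw [category_analyze, pvAOuter_eq_find?, hflat, List.find?_map, hc]
  cases h : pvT.find? (fun e => input_list.contains e.1) <;> simp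

set_option maxRecDepth 8000 in
lemma pvBTable_eq : pvBTable = PySem.Dict.mk pvT := by decide

lemma pvBGet (s : String) :
    pvBTable.get? s = (pvT.find? (fun e => e.1 == s)).map (fun e => e.2) := by
  rw [pvBTable_eq]; rfl

-- left-biased minimum-rank merge on fold states
def pvMerge (a b : Option (Int × String × String)) : Option (Int × String × String) :=
  match a, b with
  | none, b => b
  | a, none => a
  | some a, some b => if b.1 < a.1 then some b else some a

-- the same merge on table entries
def pvMergeE (a b : Option (String × Int × String)) : Option (String × Int × String) :=
  match a, b with
  | none, b => b
  | a, none => a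
  | some a, some b => if b.2.1 < a.2.1 then some b else some a

lemma pvStep_eq_merge (b : Option (Int × String × String)) (x : String) :
    pvBStep b x = pvMerge b ((pvBTable.get? x).map (fun info => (info.1, x, info.2))) := by
  unfold pvBStep pvMerge
  cases pvBTable.get? x with
  | none => cases b <;> rfl
  | some info => cases b <;> rfl

lemma pvMerge_assoc (a b c : Option (Int × String × String)) :
    pvMerge (pvMerge a b) c = pvMerge a (pvMerge b c) := by
  cases a with
  | none => rfl
  | some a =>
    cases b with
    | none => rfl
    | some b =>
      cases c with
      | none => by_cases h : b.1 < a.1 <;> simp [pvMerge, h]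
      | some c =>
        by_cases h1 : b.1 < a.1 <;> by_cases h2 : c.1 < b.1 <;> by_cases h3 : c.1 < a.1 <;>
          simp [pvMerge, h1, h2, h3] <;> (exfalso; omega)

lemma pvFoldl_merge (l : List String) (b : Option (Int × String × String)) :
    l.foldl pvBStep b = pvMerge b (l.foldl pvBStep none) := by
  induction l generalizing b with
  | nil => cases b <;> rfl
  | cons x l ih =>
    simp only [List.foldl_cons]
    rw [ih (pvBStep b x), ih (pvBStep none x), pvStep_eq_merge b x, pvStep_eq_merge none x,
      pvMerge_assoc]
    rfl

-- first match on an 'or' of predicates, over a list with strictly increasing ranks,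
-- is the smaller-rank one of the two first matches
lemma pvFind_or (Tl : List (String × Int × String))
    (hinc : Tl.Pairwise (fun a b => a.2.1 < b.2.1)) (p q : (String × Int × String) → Bool) :
    Tl.find? (fun e => p e || q e) = pvMergeE (Tl.find? p) (Tl.find? q) := by
  induction Tl with
  | nil => rfl
  | cons e rest ih =>
    have hlt : ∀ e' ∈ rest, e.2.1 < e'.2.1 := (List.pairwise_cons.mp hinc).1
    have hrest := ih (List.pairwise_cons.mp hinc).2
    by_cases hp : p e = true <;> by_cases hq : q e = true
    · simp [hp, hq, pvMergeE]
    · simp only [List.find?_cons, hp, hq, Bool.true_or]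
      cases hfq : rest.find? q with
      | none => simp [pvMergeE]
      | some e2 =>
        have : e.2.1 < e2.2.1 := hlt e2 (List.mem_of_find?_eq_some hfq)
        simp [pvMergeE, not_lt_of_gt this]
    · simp only [List.find?_cons, hp, hq, Bool.or_true]
      cases hfp : rest.find? p with
      | none => simp [pvMergeE]
      | some e1 =>
        have : e.2.1 < e1.2.1 := hlt e1 (List.mem_of_find?_eq_some hfp)
        simp [pvMergeE, this]
    · simp only [List.find?_cons, hp, hq, Bool.or_self]
      simp only [Bool.not_eq_true] at hp hq
      simp [hrest]

-- merges agree after projecting away the kept list element / keyword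
lemma pvMerge_proj (a b : Option (Int × String × String)) (a' b' : Option (String × Int × String))
    (ha : a.map (fun v => (v.1, v.2.2)) = a'.map (fun e => (e.2.1, e.2.2)))
    (hb : b.map (fun v => (v.1, v.2.2)) = b'.map (fun e => (e.2.1, e.2.2))) :
    (pvMerge a b).map (fun v => (v.1, v.2.2)) = (pvMergeE a' b').map (fun e => (e.2.1, e.2.2)) := by
  cases a <;> cases a' <;> cases b <;> cases b' <;>
    simp_all only [Option.map_some, Option.map_none, reduceCtorEq, pvMerge, pvMergeE, Option.some.injEq, Prod.mk.injEq]
  split_ifs <;> simp_all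

lemma pvT_inc : pvT.Pairwise (fun a b => a.2.1 < b.2.1) := by decide

lemma pvMain (l : List String) :
    (l.foldl pvBStep none).map (fun v => (v.1, v.2.2)) =
      (pvT.find? (fun e => l.contains e.1)).map (fun e => (e.2.1, e.2.2)) := by
  induction l with
  | nil =>
    have : pvT.find? (fun e => ([] : List String).contains e.1) = none := by
      rw [List.find?_eq_none]; intro x _; simp
    simp only [List.foldl_nil, Option.map_none, this]
  | cons x l ih =>
    have hpred : (fun (e : String × Int × String) => (x :: l).contains e.1) =
        (fun e => (e.1 == x) || l.contains e.1) := by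
      funext e; by_cases h : e.1 = x <;> simp [h]
    simp only [List.foldl_cons]
    rw [pvFoldl_merge, hpred, pvFind_or pvT pvT_inc]
    refine pvMerge_proj _ _ _ _ ?_ ih
    rw [pvStep_eq_merge, pvBGet]
    cases h : pvT.find? (fun e => e.1 == x) <;> simp [pvMerge]

-- ===== VERDICT (by name: the statement is the Claim_ definition above) =====
theorem category_analyze_spec : Claim_equal_category_analyze := by
  intro input_list _
  unfold Spec_category_analyze
  rw [pvA_char]
  have h := pvMain input_list
  unfold category_analyze_alt
  cases h1 : input_list.foldl pvBStep none with
  | none =>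
    cases h2 : pvT.find? (fun e => input_list.contains e.1) with
    | none => rfl
    | some e => rw [h1, h2] at h; simp at h
  | some b =>
    cases h2 : pvT.find? (fun e => input_list.contains e.1) with
    | none => rw [h1, h2] at h; simp at h
    | some e =>
      rw [h1, h2] at h
      simp only [Option.map_some, Option.some.injEq, Prod.mk.injEq] at h
      exact h.2.symm
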